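-- pv_equiv track=rewrite | github.com/wink4u/Algorithm | 백준/Python/백트래킹/Gold/좋은수열.py | check
-- ===== SOURCE A (Python) =====
-- def check(br):
--     br = ''.join(map(str, br))
--     bl = len(br)
--     m = bl // 2
--     for i in range(1, m + 1):
--         if br[bl - i * 2: bl - i] == br[bl - i:]:
--             return False
--     return True
-- ===== SOURCE B (Python) =====
-- def check(br):
--     s = ''.join(map(str, br))
--     r = s[::-1]
--     n = len(r)
--     z = [0] * n
--     l = rr = 0
--     for i in range(1, n):
--         if i < rr:
--             z[i] = min(rr - i, z[i - l])
--         while i + z[i] < n and r[z[i]] == r[i + z[i]]: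
--             z[i] += 1
--         if rr < i + z[i]:
--             l, rr = i, i + z[i]
--     for i in range(1, n // 2 + 1):
--         if z[i] >= i:
--             return False
--     return True
-- ===== Notes on version B (the rewrite author's own statement) =====
-- stated objective: faster
-- what changed: Instead of comparing the two halves of every candidate suffix by string slicing (quadratic), B reverses the digit string once and computes its Z-function in linear time, so each candidate suffix-square test becomes a single array comparison z[i] >= i.
import Mathlib
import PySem

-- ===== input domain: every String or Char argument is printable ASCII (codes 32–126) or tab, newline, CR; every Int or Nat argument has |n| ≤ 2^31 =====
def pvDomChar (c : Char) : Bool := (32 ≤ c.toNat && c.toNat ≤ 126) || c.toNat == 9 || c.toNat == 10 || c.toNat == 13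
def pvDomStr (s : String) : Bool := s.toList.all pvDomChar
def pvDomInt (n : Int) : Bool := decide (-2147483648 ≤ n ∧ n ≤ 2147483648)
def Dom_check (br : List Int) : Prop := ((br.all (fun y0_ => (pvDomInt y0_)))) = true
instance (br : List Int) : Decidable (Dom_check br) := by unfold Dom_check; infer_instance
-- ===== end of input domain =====

-- B replaces A's per-candidate slice comparisons with a single Z-function pass over the
-- reversed digit string (objective: alternative algorithm; A is O(n^2), B is O(n)).

-- ===== PORT A =====
-- br = ''.join(map(str, br)) ported through List Char (PySem.Int.toChars; join with '' is concatenation)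
def check (br : List Int) : Bool :=
  let s : List Char := (br.map PySem.Int.toChars).flatten
  let bl : Int := (s.length : Int)
  let m : Int := PySem.Int.floordiv bl 2
  (PySem.List.pyRange 1 (m + 1)).all fun i =>
    !(PySem.List.slice s (some (bl - i * 2)) (some (bl - i)) == PySem.List.slice s (some (bl - i)) none)

-- ===== PORT B =====
-- helpers for B: the Z-algorithm's inner while loop and one iteration of its outer for loop
-- while i + z[i] < n and r[z[i]] == r[i + z[i]]: z[i] += 1   (indices in range whenever the guard holds)
def pvExtZ (r : List Char) (i : Nat) (z : Nat) : Nat :=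
  if h : i + z < r.length ∧ r.getD z ' ' = r.getD (i + z) ' ' then pvExtZ r i (z + 1) else z
termination_by r.length - z
decreasing_by omega

-- body of "for i in range(1, n)": z[i] seeded from the window, extended, window updated
def pvZStep (r : List Char) (st : List Nat × Nat × Nat) (i : Nat) : List Nat × Nat × Nat :=
  let z := st.1
  let l := st.2.1
  let rr := st.2.2
  let z0 := if i < rr then min (rr - i) (z.getD (i - l) 0) else z.getD i 0
  let zi := pvExtZ r i z0
  let z' := z.set i zi
  if rr < i + zi then (z', i, i + zi) else (z', l, rr)

def check_alt (br : List Int) : Bool :=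
  let s : List Char := (br.map PySem.Int.toChars).flatten
  let r : List Char := s.reverse
  let n : Nat := r.length
  let st := (PySem.List.pyRange 1 (n : Int)).foldl (fun st i => pvZStep r st i.toNat)
    (List.replicate n 0, 0, 0)
  let z := st.1
  (PySem.List.pyRange 1 (PySem.Int.floordiv (n : Int) 2 + 1)).all fun i =>
    !(decide ((i : Int) ≤ ((z.getD i.toNat 0 : Nat) : Int)))

-- ===== PRECONDITION & SPEC =====
def Spec_check (br : List Int) (out : Bool) : Prop := out = check_alt br
instance (br : List Int) (out : Bool) : Decidable (Spec_check br out) := by unfold Spec_check; infer_instance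

-- ===== CLAIM (what is proved, stated in full; the proofs are below) =====
def Claim_equal_check : Prop := ∀ (br : List Int), Dom_check br → Spec_check br (check br)

-- ===== LEMMAS AND PROOFS =====

-- longest common prefix length, and its characterisations
def pvLcp : List Char → List Char → Nat
  | c :: cs, d :: ds => if c = d then pvLcp cs ds + 1 else 0
  | _, _ => 0

lemma pvLcp_le_right : ∀ (a b : List Char), pvLcp a b ≤ b.length := by
  intro a
  induction a with
  | nil => intro b; cases b <;> simp [pvLcp]
  | cons c cs ih =>
    intro b
    cases b with
    | nil => simp [pvLcp]
    | cons d ds =>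
      simp only [pvLcp, List.length_cons]
      split
      · exact Nat.add_le_add_right (ih ds) 1
      · omega

lemma pvLcp_getD_eq : ∀ (a b : List Char) (j : Nat), j < pvLcp a b →
    a.getD j ' ' = b.getD j ' ' := by
  intro a
  induction a with
  | nil => intro b j h; cases b <;> simp [pvLcp] at h
  | cons c cs ih =>
    intro b j h
    cases b with
    | nil => simp [pvLcp] at h
    | cons d ds =>
      simp only [pvLcp] at h
      split at h
      · cases j with
        | zero => simpa
        | succ j => simpa using ih ds j (by omega)
      · omega

lemma pvLcp_getD_ne : ∀ (a b : List Char), pvLcp a b < a.length → pvLcp a b < b.length →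
    a.getD (pvLcp a b) ' ' ≠ b.getD (pvLcp a b) ' ' := by
  intro a
  induction a with
  | nil => intro b h _; simp at h
  | cons c cs ih =>
    intro b h1 h2
    cases b with
    | nil => simp at h2
    | cons d ds =>
      simp only [pvLcp] at *
      split at h1
      · rename_i he
        rw [if_pos he] at h2
        rw [if_pos he]
        simp only [List.length_cons] at h1 h2
        simpa using ih ds (by omega) (by omega)
      · rename_i he
        rw [if_neg he]
        simpa using he

lemma pvLcp_ge_of_forall : ∀ (k : Nat) (a b : List Char), k ≤ a.length → k ≤ b.length →
    (∀ j, j < k → a.getD j ' ' = b.getD j ' ') → k ≤ pvLcp a b := by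
  intro k
  induction k with
  | zero => omega
  | succ k ih =>
    intro a b ha hb h
    cases a with
    | nil => simp at ha
    | cons c cs =>
      cases b with
      | nil => simp at hb
      | cons d ds =>
        have h0 := h 0 (by omega)
        simp only [List.getD_cons_zero] at h0
        simp only [pvLcp, if_pos h0]
        have := ih cs ds (by simpa using ha) (by simpa using hb)
          (fun j hj => by simpa using h (j+1) (by omega))
        omega

-- k ≤ lcp a b ↔ first k chars agree

-- k ≤ lcp a b ↔ the first k chars agree
lemma pvLcp_ge_iff_take (k : Nat) (a b : List Char) (ha : k ≤ a.length) (hb : k ≤ b.length) :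
    k ≤ pvLcp a b ↔ a.take k = b.take k := by
  constructor
  · intro h
    apply List.ext_getElem (by simp; omega)
    intro j hj _
    have hjk : j < k := by simp at hj; omega
    have := pvLcp_getD_eq a b j (by omega)
    simp only [List.getElem_take]
    rwa [List.getD_eq_getElem _ _ (by omega), List.getD_eq_getElem _ _ (by omega)] at this
  · intro h
    apply pvLcp_ge_of_forall k a b ha hb
    intro j hj
    have : (a.take k).getD j ' ' = (b.take k).getD j ' ' := by rw [h]
    rw [List.getD_eq_getElem _ _ (by simp; omega), List.getD_eq_getElem _ _ (by simp; omega),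
      List.getElem_take, List.getElem_take] at this
    rw [List.getD_eq_getElem _ _ (by omega), List.getD_eq_getElem _ _ (by omega)]
    exact this

-- while i + z[i] < n and r[z[i]] == r[i + z[i]]: z[i] += 1

-- the while loop computes exactly the lcp when started at a sound value
lemma pvExtZ_correct (r : List Char) (i : Nat) (hi : 1 ≤ i) :
    ∀ (z : Nat), z ≤ pvLcp r (r.drop i) → pvExtZ r i z = pvLcp r (r.drop i) := by
  intro z
  induction z using pvExtZ.induct r i with
  | case1 z h ih =>
    intro hz
    rw [pvExtZ, dif_pos h]
    rcases Nat.lt_or_ge z (pvLcp r (r.drop i)) with hlt | hge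
    · exact ih (by omega)
    · -- z = lcp but the chars match: contradiction with lcp maximality
      exfalso
      have hzeq : z = pvLcp r (r.drop i) := by omega
      have hbl : pvLcp r (r.drop i) < (r.drop i).length := by
        rw [List.length_drop]; omega
      have hal : pvLcp r (r.drop i) < r.length := by omega
      have hne := pvLcp_getD_ne r (r.drop i) hal hbl
      apply hne
      rw [← hzeq]
      have : (r.drop i).getD z ' ' = r.getD (i + z) ' ' := by
        rw [List.getD_eq_getElem _ _ (by rw [List.length_drop]; omega),
          List.getD_eq_getElem _ _ (by omega), List.getElem_drop]
      rw [this]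
      exact h.2
  | case2 z h =>
    intro hz
    rw [pvExtZ, dif_neg h]
    rcases Nat.lt_or_ge z (pvLcp r (r.drop i)) with hlt | hge
    · -- z < lcp: the while condition must have held
      exfalso
      apply h
      have hlen : pvLcp r (r.drop i) ≤ (r.drop i).length := pvLcp_le_right _ _
      rw [List.length_drop] at hlen
      constructor
      · omega
      · have := pvLcp_getD_eq r (r.drop i) z hlt
        rw [this, List.getD_eq_getElem _ _ (by rw [List.length_drop]; omega),
          List.getD_eq_getElem _ _ (by omega), List.getElem_drop]
    · omega

-- loop invariant of the Z pass: computed entries are lcps, the (l, rr) window matches the prefix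
def pvInv (r : List Char) (b : Nat) (st : List Nat × Nat × Nat) : Prop :=
  st.1.length = r.length ∧
  (∀ j, 1 ≤ j → j < b → st.1.getD j 0 = pvLcp r (r.drop j)) ∧
  (∀ j, j = 0 ∨ b ≤ j → st.1.getD j 0 = 0) ∧
  st.2.1 < b ∧ st.2.2 ≤ r.length ∧ st.2.1 ≤ st.2.2 ∧
  st.2.2 - st.2.1 ≤ pvLcp r (r.drop st.2.1)

lemma pv_window_getD (r : List Char) (l rr : Nat) (hw : rr - l ≤ pvLcp r (r.drop l))
    (m : Nat) (hm : m < rr - l) (hrr : rr ≤ r.length) :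
    r.getD m ' ' = r.getD (l + m) ' ' := by
  have h1 := pvLcp_getD_eq r (r.drop l) m (by omega)
  rw [h1, List.getD_eq_getElem _ _ (by rw [List.length_drop]; omega),
    List.getD_eq_getElem _ _ (by omega), List.getElem_drop]

lemma pvZStep_inv (r : List Char) (b : Nat) (st : List Nat × Nat × Nat)
    (hinv : pvInv r b st) (hb1 : 1 ≤ b) (hbn : b < r.length) :
    pvInv r (b + 1) (pvZStep r st b) := by
  obtain ⟨z, l, rr⟩ := st
  obtain ⟨hlen, hzc, hz0, hl, hrr, hlr, hw⟩ := hinv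
  simp only at hlen hzc hz0 hl hrr hlr hw
  set n := r.length with hn
  -- the starting value is sound
  have hstart : (if b < rr then min (rr - b) (z.getD (b - l) 0) else z.getD b 0)
      ≤ pvLcp r (r.drop b) := by
    split
    · rename_i hbr
      rcases Nat.eq_zero_or_pos l with hl0 | hl1
      · -- l = 0: the stored z[b] is still 0, so the start value is 0
        have : z.getD (b - l) 0 = 0 := by
          rw [hl0]
          exact hz0 (b - 0) (Or.inr (by omega))
        rw [this]
        simp
      have hbl1 : 1 ≤ b - l := by omega
      have hbl2 : b - l < b := by omega
      have hzbl : z.getD (b - l) 0 = pvLcp r (r.drop (b - l)) := hzc _ hbl1 hbl2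
      have hmin1 : min (rr - b) (z.getD (b - l) 0) ≤ r.length := by
        have : min (rr - b) (z.getD (b - l) 0) ≤ rr - b := Nat.min_le_left _ _
        omega
      have hmin2 : min (rr - b) (z.getD (b - l) 0) ≤ (r.drop b).length := by
        have : min (rr - b) (z.getD (b - l) 0) ≤ rr - b := Nat.min_le_left _ _
        rw [List.length_drop]
        omega
      apply pvLcp_ge_of_forall _ _ _ hmin1 hmin2
      intro j hj
      have hjrb : j < rr - b := by
        have : min (rr - b) (z.getD (b - l) 0) ≤ rr - b := Nat.min_le_left _ _
        omega
      have hj1 : j < pvLcp r (r.drop (b - l)) := by omega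
      have e1 : r.getD j ' ' = r.getD (b - l + j) ' ' := by
        have := pvLcp_getD_eq r (r.drop (b - l)) j hj1
        have hble : pvLcp r (r.drop (b - l)) ≤ (r.drop (b - l)).length := pvLcp_le_right _ _
        rw [List.length_drop] at hble
        rw [this, List.getD_eq_getElem _ _ (by rw [List.length_drop]; omega),
          List.getD_eq_getElem _ _ (by omega), List.getElem_drop]
      have e2 : r.getD (b - l + j) ' ' = r.getD (b + j) ' ' := by
        have := pv_window_getD r l rr hw (b - l + j) (by omega) hrr
        rw [this]
        congr 1
        omega
      rw [e1, e2, List.getD_eq_getElem _ _ (by omega),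
        List.getD_eq_getElem _ _ (by rw [List.length_drop]; omega), List.getElem_drop]
    · rw [hz0 b (Or.inr (by omega))]
      omega
  have hzi : pvExtZ r b (if b < rr then min (rr - b) (z.getD (b - l) 0) else z.getD b 0)
      = pvLcp r (r.drop b) := pvExtZ_correct r b hb1 _ hstart
  have hlcp_le : pvLcp r (r.drop b) ≤ n - b := by
    have := pvLcp_le_right r (r.drop b)
    rw [List.length_drop] at this
    omega
  unfold pvZStep
  simp only [hzi]
  set zi := pvLcp r (r.drop b) with hzid
  have hset1 : ∀ j, j ≠ b → (z.set b zi).getD j 0 = z.getD j 0 := by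
    intro j hj
    simp [List.getD, (Ne.symm hj)]
  have hset2 : (z.set b zi).getD b 0 = zi := by
    simp [List.getD, hlen, hbn]
  have hzc' : ∀ j, 1 ≤ j → j < b + 1 → (z.set b zi).getD j 0 = pvLcp r (r.drop j) := by
    intro j hj1 hj2
    by_cases hjb : j = b
    · subst hjb; rw [hset2]
    · rw [hset1 j hjb]; exact hzc j hj1 (by omega)
  have hz0' : ∀ j, j = 0 ∨ b + 1 ≤ j → (z.set b zi).getD j 0 = 0 := by
    intro j hj
    have hjb : j ≠ b := by omega
    rw [hset1 j hjb]
    exact hz0 j (by omega)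
  have hlen' : (z.set b zi).length = n := by simp [hlen]
  split
  · rename_i hgt
    refine ⟨hlen', hzc', hz0', ?_, ?_, ?_, ?_⟩
    · show b < b + 1
      omega
    · show b + zi ≤ r.length
      omega
    · show b ≤ b + zi
      omega
    · show b + zi - b ≤ pvLcp r (r.drop b)
      omega
  · rename_i hle
    refine ⟨hlen', hzc', hz0', ?_, ?_, ?_, ?_⟩
    · show l < b + 1
      omega
    · show rr ≤ r.length
      omega
    · show l ≤ rr
      exact hlr
    · show rr - l ≤ pvLcp r (r.drop l)
      exact hw

lemma pv_getD_replicate_zero (n j : Nat) : (List.replicate n (0:Nat)).getD j 0 = 0 := by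
  rcases Nat.lt_or_ge j n with h | h
  · exact List.getD_replicate 0 h
  · have hlen : (List.replicate n (0:Nat)).length ≤ j := by
      simp [List.length_replicate]; omega
    simp [List.getD, List.getElem?_eq_none_iff.mpr hlen]

lemma pv_fold_inv (r : List Char) :
    ∀ b : Nat, 1 ≤ b → b ≤ r.length →
    pvInv r b ((PySem.List.pyRange 1 (b : Int)).foldl (fun st i => pvZStep r st i.toNat)
      (List.replicate r.length 0, 0, 0)) := by
  intro b
  induction b with
  | zero => omega
  | succ b ih =>
    intro _ hble
    rcases Nat.eq_zero_or_pos b with hb0 | hb1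
    · subst hb0
      rw [show ((0 + 1 : Nat) : Int) = (1 : Int) from by norm_num,
        show PySem.List.pyRange (1:Int) 1 1 = [] from by decide]
      simp only [List.foldl_nil]
      refine ⟨by simp, fun j h1 h2 => by omega,
        fun j _ => pv_getD_replicate_zero _ _, ?_, ?_, ?_, ?_⟩
      · show (0:Nat) < 0 + 1
        omega
      · show (0:Nat) ≤ r.length
        omega
      · show (0:Nat) ≤ 0
        omega
      · show (0:Nat) - 0 ≤ pvLcp r (r.drop 0)
        simp
    · have hcast : ((b + 1 : Nat) : Int) = (b : Int) + 1 := by push_cast; ring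
      rw [hcast, PySem.List.pyRange_one_succ_right (by exact_mod_cast hb1), List.foldl_append]
      simp only [List.foldl_cons, List.foldl_nil, Int.toNat_natCast]
      exact pvZStep_inv r b _ (ih hb1 (by omega)) hb1 (by omega)

lemma pv_all_congr {α : Type} (l : List α) (p q : α → Bool) (h : ∀ a ∈ l, p a = q a) :
    l.all p = l.all q := by
  induction l with
  | nil => rfl
  | cons a t ih =>
    simp only [List.all_cons, h a (List.mem_cons_self ..),
      ih (fun x hx => h x (List.mem_cons_of_mem _ hx))]

-- A's slice test at candidate k is "the last k chars repeat", i.e. lcp of reversed ≥ k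

-- A's slice test at candidate k says "the last k chars repeat", i.e. lcp of the reversal ≥ k
lemma pv_key2 (s : List Char) (k : Nat) (hk1 : 1 ≤ k) (hk2 : 2 * k ≤ s.length) :
    ((s.drop (s.length - 2*k)).take k = s.drop (s.length - k)) ↔
      k ≤ pvLcp s.reverse (s.reverse.drop k) := by
  set n := s.length with hn
  set r := s.reverse with hr
  have hrlen : r.length = n := by simp [hr, hn]
  have hs' : s = r.reverse := (List.reverse_reverse s).symm
  have h1 : s.drop (n - 2*k) = (r.take (2*k)).reverse := by
    rw [hs', List.drop_reverse, hrlen]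
    have e : n - (n - 2*k) = 2*k := by omega
    rw [e]
  have h2 : (s.drop (n - 2*k)).take k = ((r.drop k).take k).reverse := by
    rw [h1, List.take_reverse, List.length_take, hrlen]
    have hmin : min (2*k) n - k = k := by omega
    rw [hmin, List.drop_take]
    have e : 2*k - k = k := by omega
    rw [e]
  have h3 : s.drop (n - k) = (r.take k).reverse := by
    rw [hs', List.drop_reverse, hrlen]
    have e : n - (n - k) = k := by omega
    rw [e]
  rw [h2, h3, List.reverse_inj,
    pvLcp_ge_iff_take k r (r.drop k) (by omega) (by rw [List.length_drop]; omega)]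
  constructor
  · intro h; rw [h]
  · intro h; rw [h]

-- ===== VERDICT (by name: the statement is the Claim_ definition above) =====
theorem check_spec : Claim_equal_check := by
  intro br _
  unfold Spec_check check check_alt
  simp only [List.length_reverse]
  apply pv_all_congr
  intro i hi
  set s : List Char := (br.map PySem.Int.toChars).flatten with hs
  set n := s.length with hn
  have hfd : PySem.Int.floordiv (n : Int) 2 = ((n / 2 : Nat) : Int) := by
    exact_mod_cast PySem.Int.floordiv_natCast n 2
  rw [hfd] at hi
  rcases PySem.List.mem_pyRange_one.mp hi with ⟨hi1, hi2⟩
  set k := i.toNat with hk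
  have hik : i = (k : Int) := by omega
  have hk1 : 1 ≤ k := by omega
  have hk2 : 2 * k ≤ n := by
    have : i < ((n / 2 : Nat) : Int) + 1 := hi2
    omega
  have e1 : (n : Int) - i * 2 = ((n - 2*k : Nat) : Int) := by
    rw [Nat.cast_sub (by omega)]
    push_cast
    omega
  have e2 : (n : Int) - i = ((n - k : Nat) : Int) := by
    rw [Nat.cast_sub (by omega)]
    omega
  rw [e1, e2, PySem.List.slice_natCast, PySem.List.slice_from_natCast]
  have e3 : (n - k) - (n - 2*k) = k := by omega
  rw [e3]
  -- B side: the computed z-value at k is the lcp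
  have hrlen : s.reverse.length = n := by simp [hn]
  have hn2 : 2 ≤ n := by omega
  have hinv := pv_fold_inv s.reverse n (by omega) (by omega)
  rw [hrlen] at hinv
  obtain ⟨_, hzc, _, _, _, _, _⟩ := hinv
  have hkn : k < n := by omega
  have hzk := hzc k hk1 hkn
  -- warning: the fold in the goal should match hzk's fold
  have key := pv_key2 s k hk1 hk2
  by_cases hP : (s.drop (n - 2*k)).take k = s.drop (n - k)
  · have hQ : (i : Int) ≤ (((( (PySem.List.pyRange 1 (n : Int)).foldl
        (fun st i => pvZStep s.reverse st i.toNat) (List.replicate n 0, 0, 0)).1.getD k 0 : Nat)) : Int) := by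
      rw [hzk]
      have := key.mp hP
      omega
    simp only [List.getD] at hQ
    simp [hP, hQ]
  · have hQ : ¬ ((i : Int) ≤ ((((PySem.List.pyRange 1 (n : Int)).foldl
        (fun st i => pvZStep s.reverse st i.toNat) (List.replicate n 0, 0, 0)).1.getD k 0 : Nat) : Int)) := by
      rw [hzk]
      intro hq
      exact hP (key.mpr (by omega))
    simp only [List.getD] at hQ
    simp [hP, hQ]
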